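-- pv_equiv track=rewrite | github.com/caleblevy/funcstructs | funcstructs/structures/rootedtrees.py | _levels_from_preim
-- ===== SOURCE A (Python) =====
-- def _levels_from_preim(graph, root=0, keys=None):
--     """Return the level sequence of the ordered tree formed such that
--     graph[x] are the nodes attached to x.
--
--     Note: The graph must be acyclic, or the function may not terminate.
--     """
--     # Algorithm for finding an Endofunction's ConjuConjugacyClass taking
--     # inspiration from the idea that the preimage of an endofunction
--     # is literally the standard representation of a graph as a mapping
--     # of its vertices to the set of its edges.
--     #
--     # The original implementation of this algorithm was recursive,
--     # however for functions with trees more than 2000 nodes deep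
--     # (i.e. sin(x) approximated on 16-bit floats) this would cause
--     # a stack overflow, so I moved it to a managed stack.
--     #
--     # Recursive (and more readable) version was as follows:
--     #
--     #   def levels(graph, root, level=0):
--     #       seq = [level]
--     #       for x in graph[root]:
--     #           seq.extend(levels(graph, x, level+1))
--     #       return seq
--     if keys is not None:
--         for connections in graph:
--             connections.sort(key=keys.__getitem__)
--     node_stack = [root]
--     level = 0
--     node_levels = {root: level}
--     while node_stack:
--         x = node_stack.pop()
--         level = node_levels[x]
--         yield level
--         level += 1
--         for y in graph[x]:
--             node_stack.append(y)
--             # Need to compute even for dominant tree, since levels will change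
--             node_levels[y] = level
-- ===== SOURCE B (Python) =====
-- def _levels_from_preim(graph, root=0, keys=None):
--     """Return the level sequence of the ordered tree formed such that
--     graph[x] are the nodes attached to x.
--
--     Recursive generator: same in-place sort of graph when keys is given,
--     then a DFS that visits children in reversed list order (matching the
--     pop-from-end stack of the original).
--     """
--     if keys is not None:
--         for connections in graph:
--             connections.sort(key=keys.__getitem__)
--     def gen(x, level):
--         yield level
--         for y in reversed(graph[x]):
--             yield from gen(y, level + 1)
--     return gen(root, 0)
-- ===== Notes on version B (the rewrite author's own statement) =====
-- stated objective: simpler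
-- what changed: Replaces the managed stack + shared node_levels dictionary with a short recursive generator that yields the level and recurses over reversed(graph[x]), keeping the same in-place sort when keys is given.
-- outside the precondition, e.g. on _levels_from_preim([[1, 2], [], [1]], 0, None): A returns [0, 1, 2, 2], B returns [0, 1, 2, 1]; on _levels_from_preim([[1, 2], [2], []], 0, None): A returns [0, 1, 1, 2], B returns [0, 1, 1, 2]
import Mathlib
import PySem

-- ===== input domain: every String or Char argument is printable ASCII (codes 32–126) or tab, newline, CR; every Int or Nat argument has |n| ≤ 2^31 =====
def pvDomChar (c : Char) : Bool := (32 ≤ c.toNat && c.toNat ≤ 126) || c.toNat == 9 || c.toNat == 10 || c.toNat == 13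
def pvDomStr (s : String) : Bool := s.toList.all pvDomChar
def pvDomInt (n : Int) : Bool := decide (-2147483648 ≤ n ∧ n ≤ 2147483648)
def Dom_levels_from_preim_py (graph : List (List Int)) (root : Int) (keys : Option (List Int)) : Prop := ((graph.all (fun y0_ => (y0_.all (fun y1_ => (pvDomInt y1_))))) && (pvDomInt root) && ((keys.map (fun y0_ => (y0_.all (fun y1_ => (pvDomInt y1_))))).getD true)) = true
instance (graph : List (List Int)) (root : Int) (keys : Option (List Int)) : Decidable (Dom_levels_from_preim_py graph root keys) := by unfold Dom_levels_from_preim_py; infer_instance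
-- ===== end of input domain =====

-- B replaces A's managed stack + shared level dictionary by a recursive DFS generator
-- (children in reversed list order); when `keys` is given both perform the same in-place
-- sort of graph's rows (a mutation of the argument — the equivalence proved here is about
-- the yielded sequence).

-- ===== PORT A =====
-- shared by both ports: the in-place `connections.sort(key=keys.__getitem__)` pass
-- (the .getD 0 default is never reached under Pre_, where every entry is a valid index into keys)
def pvSortGraph (graph : List (List Int)) (keys : Option (List Int)) : List (List Int) :=
  match keys with
  | none => graph
  | some ks => graph.map (fun l => PySem.List.sorted l (fun y => (PySem.List.pyGet? ks y).getD 0))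

-- the while-loop over the managed stack; stack head = Python's list end (append/pop site);
-- `.getD []` / `.getD x 0` are never the default under Pre_ (valid indices, key present)
def pvStepA (g : List (List Int)) : Nat → List Int → PySem.Dict Int Int → List Int → List Int
  | 0, _, _, acc => acc.reverse
  | _ + 1, [], _, acc => acc.reverse
  | f + 1, x :: st, lv, acc =>
    let level := lv.getD x 0
    let p := ((PySem.List.pyGet? g x).getD []).foldl
        (fun (p : List Int × PySem.Dict Int Int) y => (y :: p.1, p.2.insert y (level + 1))) (st, lv)
    pvStepA g f p.1 p.2 (level :: acc)

-- fuel: a totality guard only; under Pre_ the number of loop iterations is below it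
def pvFuelA (g : List (List Int)) : Nat := ((g.map List.length).sum + 2) ^ (g.length + 1)

def levels_from_preim_py (graph : List (List Int)) (root : Int) (keys : Option (List Int)) : List Int :=
  let g := pvSortGraph graph keys
  pvStepA g (pvFuelA g) [root] (PySem.Dict.empty.insert root 0) []

-- ===== PORT B =====
-- gen(x, level): yield level; for y in reversed(graph[x]): yield from gen(y, level+1)
-- fuel = depth guard only; under Pre_ every root path has length ≤ len(graph)
def pvDfsB (g : List (List Int)) : Nat → Int → Int → List Int
  | 0, _, _ => []
  | f + 1, x, level =>
    level :: ((PySem.List.pyGet? g x).getD []).reverse.flatMap (fun y => pvDfsB g f y (level + 1))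

def levels_from_preim_py_alt (graph : List (List Int)) (root : Int) (keys : Option (List Int)) : List Int :=
  let g := pvSortGraph graph keys
  pvDfsB g (g.length + 1) root 0

-- ===== PRECONDITION & SPEC =====
def pvNorm (n : Nat) (y : Int) : Int := if y < 0 then y + n else y
def pvChildren (graph : List (List Int)) (x : Int) : List Int := (PySem.List.pyGet? graph x).getD []
-- one BFS layer: the set of (normalized) children of a set of nodes
def pvNext (graph : List (List Int)) (fr : List Int) : List Int :=
  PySem.Set.ofList (fr.flatMap (fun x => (pvChildren graph x).map (pvNorm graph.length)))
def pvFront (graph : List (List Int)) (root : Int) : Nat → List Int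
  | 0 => [pvNorm graph.length root]
  | k + 1 => pvNext graph (pvFront graph root k)

-- Pre_ restricts to the function's documented domain — graphs on which every node reachable
-- from root lies at one well-defined depth and no reachable cycle exists (every rooted tree,
-- the stated input, satisfies this), with every reachable index valid
-- (and, when keys is given, every entry of graph a valid index into keys, since the sort
-- touches all rows); outside it A's shared level dictionary and B's plain unfolding are two
-- equally defensible readings of an unspecified "level sequence" (they can coincide there,
-- see cites).
def Pre_levels_from_preim_py (graph : List (List Int)) (root : Int) (keys : Option (List Int)) : Prop :=
  PySem.Raise.InRange graph.length root ∧
  ((List.range (graph.length + 1)).all (fun k => (pvFront graph root k).all (fun v =>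
      (pvChildren graph v).all (fun y => decide (PySem.Raise.InRange graph.length y))))) = true ∧
  ((keys.map (fun ks => graph.all (fun l => l.all (fun y => decide (PySem.Raise.InRange ks.length y))))).getD true) = true ∧
  pvFront graph root (graph.length + 1) = [] ∧
  ((List.range (graph.length + 1)).all (fun i => (List.range (graph.length + 1)).all (fun j =>
      i == j || (pvFront graph root i).all (fun v => !((pvFront graph root j).contains v))))) = true
instance (graph : List (List Int)) (root : Int) (keys : Option (List Int)) : Decidable (Pre_levels_from_preim_py graph root keys) := by unfold Pre_levels_from_preim_py; infer_instance

def pvWitness_levels_from_preim_py : List (List Int) × Int × Option (List Int) :=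
  ([[2, 1], [], [3], []], 0, some [3, 1, 0, 2])

def Spec_levels_from_preim_py (graph : List (List Int)) (root : Int) (keys : Option (List Int)) (out : List Int) : Prop := out = levels_from_preim_py_alt graph root keys
instance (graph : List (List Int)) (root : Int) (keys : Option (List Int)) (out : List Int) : Decidable (Spec_levels_from_preim_py graph root keys out) := by unfold Spec_levels_from_preim_py; infer_instance

-- ===== CLAIM (what is proved, stated in full; the proofs are below) =====
def Claim_equal_levels_from_preim_py : Prop := ∀ (graph : List (List Int)) (root : Int) (keys : Option (List Int)), Dom_levels_from_preim_py graph root keys → Pre_levels_from_preim_py graph root keys → Spec_levels_from_preim_py graph root keys (levels_from_preim_py graph root keys)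

-- ===== LEMMAS AND PROOFS =====

-- indexing a row by x and by its normalized index agree
lemma pvGet_norm {α : Type} (xs : List α) (x : Int) (h : PySem.Raise.InRange xs.length x) :
    PySem.List.pyGet? xs (pvNorm xs.length x) = PySem.List.pyGet? xs x := by
  obtain ⟨h1, h2⟩ := h
  simp only [PySem.List.pyGet?, PySem.List.pyIdx?, pvNorm]
  split_ifs <;> try omega
  · have : (x + ↑xs.length).toNat = xs.length - (-x).toNat := by omega
    rw [this]
  · rfl

lemma pvGet_map {α β : Type} (f : α → β) (l : List α) (i : Int) :
    PySem.List.pyGet? (l.map f) i = (PySem.List.pyGet? l i).map f := by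
  simp [PySem.List.pyGet?]

-- the sorted graph's rows are permutations of the original rows
lemma pvSort_row_perm (graph : List (List Int)) (keys : Option (List Int)) (x : Int) :
    ((PySem.List.pyGet? (pvSortGraph graph keys) x).getD []).Perm
      ((PySem.List.pyGet? graph x).getD []) := by
  cases keys with
  | none => exact List.Perm.refl _
  | some ks =>
    simp only [pvSortGraph, pvGet_map]
    cases PySem.List.pyGet? graph x with
    | none => exact List.Perm.refl _
    | some r => exact PySem.List.sorted_perm r _ _

lemma pvSort_length (graph : List (List Int)) (keys : Option (List Int)) :
    (pvSortGraph graph keys).length = graph.length := by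
  cases keys <;> simp [pvSortGraph]

-- depth-sufficiency: fuel f is enough to fully unfold the DFS from x
def pvSuff (g : List (List Int)) : Nat → Int → Bool
  | 0, _ => false
  | f + 1, x => ((PySem.List.pyGet? g x).getD []).all (pvSuff g f)

lemma pvDfsB_stab (g : List (List Int)) (f : Nat) :
    ∀ x l f', pvSuff g f x = true → f ≤ f' → pvDfsB g f' x l = pvDfsB g f x l := by
  induction f with
  | zero => intro x l f' h; simp [pvSuff] at h
  | succ f ih =>
    intro x l f' h hle
    obtain ⟨f'', rfl⟩ : ∃ f'', f' = f'' + 1 := ⟨f' - 1, by omega⟩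
    replace h : ((PySem.List.pyGet? g x).getD []).all (pvSuff g f) = true := h
    simp only [List.all_eq_true] at h
    simp only [pvDfsB, List.cons.injEq, true_and]
    exact List.flatMap_congr fun y hy =>
      ih y (l + 1) f'' (h y (List.mem_reverse.mp hy)) (by omega)

lemma pvSumMapLe (l : List Int) (f : Int → Nat) (B : Nat) (h : ∀ x ∈ l, f x ≤ B) :
    (l.map f).sum ≤ l.length * B := by
  induction l with
  | nil => simp
  | cons a l ih =>
    simp only [List.map_cons, List.sum_cons, List.length_cons]
    have := ih (fun x hx => h x (List.mem_cons_of_mem a hx))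
    have := h a List.mem_cons_self
    nlinarith

lemma pvDfsB_len (g : List (List Int)) (f : Nat) :
    ∀ x l, (pvDfsB g f x l).length ≤ ((g.map List.length).sum + 2) ^ f := by
  induction f with
  | zero => intro x l; simp [pvDfsB]
  | succ f ih =>
    intro x l
    have hch : ((PySem.List.pyGet? g x).getD []).length ≤ (g.map List.length).sum := by
      cases hg : PySem.List.pyGet? g x with
      | none => simp
      | some r =>
        have hr := PySem.List.mem_of_pyGet?_eq_some g hg
        simp only [Option.getD_some]
        exact List.le_sum_of_mem (List.mem_map_of_mem hr)
    simp only [pvDfsB, List.length_cons, List.length_flatMap]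
    have hsum := pvSumMapLe ((PySem.List.pyGet? g x).getD []).reverse
      (fun y => (pvDfsB g f y (l + 1)).length) (((g.map List.length).sum + 2) ^ f)
      (fun y _ => ih y (l + 1))
    have hp : 1 ≤ ((g.map List.length).sum + 2) ^ f := Nat.one_le_pow _ _ (by omega)
    rw [List.length_reverse] at hsum
    have : ((g.map List.length).sum + 2) ^ (f + 1)
        = ((g.map List.length).sum + 2) ^ f * ((g.map List.length).sum + 2) := pow_succ _ _
    nlinarith

lemma pvDfsB_len_pos (g : List (List Int)) (f : Nat) (x l : Int) (hf : 0 < f) :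
    0 < (pvDfsB g f x l).length := by
  obtain ⟨f', rfl⟩ : ∃ f', f = f' + 1 := ⟨f - 1, by omega⟩
  simp [pvDfsB]

-- stepping the frontier: a child of a node at depth k lies at depth k+1
lemma pvFront_step (graph : List (List Int)) (root : Int) (keys : Option (List Int)) (k : Nat)
    (x y : Int) (hx : PySem.Raise.InRange graph.length x)
    (hm : pvNorm graph.length x ∈ pvFront graph root k)
    (hy : y ∈ (PySem.List.pyGet? (pvSortGraph graph keys) x).getD []) :
    pvNorm graph.length y ∈ pvFront graph root (k + 1) := by
  have hy' : y ∈ (PySem.List.pyGet? graph x).getD [] :=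
    (pvSort_row_perm graph keys x).mem_iff.mp hy
  show pvNorm graph.length y ∈ pvNext graph (pvFront graph root k)
  rw [pvNext, PySem.Set.mem_ofList]
  refine List.mem_flatMap.mpr ⟨pvNorm graph.length x, hm, ?_⟩
  refine List.mem_map_of_mem ?_
  rw [pvChildren, pvGet_norm graph x hx]
  exact hy'

-- a node at depth k unfolds fully with fuel n+1-k
lemma pvFront_suff (graph : List (List Int)) (root : Int) (keys : Option (List Int))
    (hG : ∀ k ≤ graph.length, ∀ v ∈ pvFront graph root k,
      ∀ y ∈ pvChildren graph v, PySem.Raise.InRange graph.length y)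
    (hE : pvFront graph root (graph.length + 1) = []) :
    ∀ m k x, k + m = graph.length + 1 → PySem.Raise.InRange graph.length x →
      pvNorm graph.length x ∈ pvFront graph root k →
      pvSuff (pvSortGraph graph keys) m x = true := by
  intro m
  induction m with
  | zero =>
    intro k x hk _ hm
    rw [show k = graph.length + 1 by omega, hE] at hm
    simp at hm
  | succ m ih =>
    intro k x hk hx hm
    show ((PySem.List.pyGet? (pvSortGraph graph keys) x).getD []).all
      (pvSuff (pvSortGraph graph keys) m) = true
    rw [List.all_eq_true]
    intro y hy
    have hy2 : y ∈ pvChildren graph (pvNorm graph.length x) := by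
      rw [pvChildren, pvGet_norm graph x hx]
      exact (pvSort_row_perm graph keys x).mem_iff.mp hy
    have hyr : PySem.Raise.InRange graph.length y := hG k (by omega) _ hm y hy2
    exact ih (k + 1) y (by omega) hyr (pvFront_step graph root keys k x y hx hm hy)

-- the dictionary after pushing all children of one node
lemma pvFold_push (ch : List Int) (L : Int) :
    ∀ (st : List Int) (lv : PySem.Dict Int Int),
      ch.foldl (fun (p : List Int × PySem.Dict Int Int) y => (y :: p.1, p.2.insert y L)) (st, lv)
        = (ch.reverse ++ st, ch.foldl (fun d y => d.insert y L) lv) := by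
  induction ch with
  | nil => intro st lv; simp
  | cons c ch ih =>
    intro st lv
    simp only [List.foldl_cons, List.reverse_cons, List.append_assoc, List.singleton_append, ih]

lemma pvFold_getD (ch : List Int) (L : Int) :
    ∀ (lv : PySem.Dict Int Int) (z : Int),
      (ch.foldl (fun d y => d.insert y L) lv).getD z 0 = if z ∈ ch then L else lv.getD z 0 := by
  induction ch with
  | nil => intro lv z; simp
  | cons c ch ih =>
    intro lv z
    simp only [List.foldl_cons, ih, List.mem_cons, PySem.Dict.getD_insert]
    by_cases hz : z ∈ ch
    · simp [hz]
    · by_cases hc : z = c <;> simp [hz, hc]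

-- main invariant lemma: the stack machine emits the concatenated DFS unfoldings of the stack
lemma pvMachine (graph : List (List Int)) (root : Int) (keys : Option (List Int))
    (hG : ∀ k ≤ graph.length, ∀ v ∈ pvFront graph root k,
      ∀ y ∈ pvChildren graph v, PySem.Raise.InRange graph.length y)
    (hE : pvFront graph root (graph.length + 1) = [])
    (hU : ∀ i ≤ graph.length, ∀ j ≤ graph.length, i ≠ j →
      ∀ v ∈ pvFront graph root i, v ∉ pvFront graph root j) :
    ∀ (f : Nat) (st : List Int) (lv : PySem.Dict Int Int) (acc : List Int),
      (∀ x ∈ st, PySem.Raise.InRange graph.length x ∧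
        ∃ k, k ≤ graph.length ∧ pvNorm graph.length x ∈ pvFront graph root k ∧
          lv.getD x 0 = (k : Int)) →
      (st.map (fun x =>
          (pvDfsB (pvSortGraph graph keys) (graph.length + 1) x (lv.getD x 0)).length)).sum ≤ f →
      pvStepA (pvSortGraph graph keys) f st lv acc
        = acc.reverse ++ st.flatMap (fun x =>
            pvDfsB (pvSortGraph graph keys) (graph.length + 1) x (lv.getD x 0)) := by
  intro f
  induction f with
  | zero =>
    intro st lv acc hinv hf
    match st with
    | [] => simp [pvStepA]
    | x :: st' =>
      exfalso
      simp only [List.map_cons, List.sum_cons] at hf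
      have := pvDfsB_len_pos (pvSortGraph graph keys) (graph.length + 1) x (lv.getD x 0) (by omega)
      omega
  | succ f ih =>
    intro st lv acc hinv hf
    match st with
    | [] => simp [pvStepA]
    | x :: st' =>
      obtain ⟨hxr, k, hk, hmem, hlv⟩ := hinv x List.mem_cons_self
      set g := pvSortGraph graph keys with hgdef
      set n := graph.length with hndef
      set ch := (PySem.List.pyGet? g x).getD [] with hchdef
      set L := lv.getD x 0 with hLdef
      set lv' := ch.foldl (fun d y => d.insert y (L + 1)) lv with hlv'def
      -- one machine step
      have hstep : pvStepA g (f + 1) (x :: st') lv acc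
          = pvStepA g f (ch.reverse ++ st') lv' (L :: acc) := by
        simp only [pvStepA]
        rw [pvFold_push]
      -- facts about children
      have hchG : ∀ y ∈ ch, PySem.Raise.InRange n y := by
        intro y hy
        have hy2 : y ∈ pvChildren graph (pvNorm n x) := by
          rw [pvChildren, pvGet_norm graph x hxr]
          exact (pvSort_row_perm graph keys x).mem_iff.mp hy
        exact hG k hk _ hmem y hy2
      have hchF : ∀ y ∈ ch, pvNorm n y ∈ pvFront graph root (k + 1) := by
        intro y hy
        exact pvFront_step graph root keys k x y hxr hmem hy
      have hk1 : ∀ y ∈ ch, k + 1 ≤ n := by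
        intro y hy
        by_contra hcon
        have hkn : k = n := by omega
        have hF := hchF y hy
        rw [hkn, hE] at hF
        simp at hF
      have hgetD : ∀ z, lv'.getD z 0 = if z ∈ ch then L + 1 else lv.getD z 0 :=
        fun z => pvFold_getD ch (L + 1) lv z
      -- dictionary values of the remaining stack are unchanged (or rewritten consistently)
      have hstz : ∀ z ∈ st', lv'.getD z 0 = lv.getD z 0 := by
        intro z hz
        rw [hgetD z]
        by_cases hzc : z ∈ ch
        · have hz1 : pvNorm n z ∈ pvFront graph root (k + 1) := hchF z hzc
          obtain ⟨hzr, kz, hkz, hzm, hzlv⟩ := hinv z (List.mem_cons_of_mem x hz)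
          have hkzeq : kz = k + 1 := by
            by_contra hne
            exact hU kz hkz (k + 1) (hk1 z hzc) hne (pvNorm n z) hzm hz1
          rw [if_pos hzc, hzlv, hkzeq, hlv]
          push_cast
          ring
        · simp [hzc]
      have hchy : ∀ y ∈ ch, lv'.getD y 0 = L + 1 := by
        intro y hy; rw [hgetD y, if_pos hy]
      -- suffix fuel stability for the children
      have hsuf : ∀ y ∈ ch, ∀ l, pvDfsB g n y l = pvDfsB g (n + 1) y l := by
        intro y hy l
        have hs : pvSuff g (n - k) y = true :=
          pvFront_suff graph root keys hG hE (n - k) (k + 1) y (by omega) (hchG y hy) (hchF y hy)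
        rw [pvDfsB_stab g (n - k) y l n hs (by omega),
          pvDfsB_stab g (n - k) y l (n + 1) hs (by omega)]
      -- head unfolding
      have hhead : pvDfsB g (n + 1) x L
          = L :: ch.reverse.flatMap (fun y => pvDfsB g (n + 1) y (lv'.getD y 0)) := by
        have h1 : pvDfsB g (n + 1) x L
            = L :: ch.reverse.flatMap (fun y => pvDfsB g n y (L + 1)) := rfl
        rw [h1]
        congr 1
        exact List.flatMap_congr fun y hy => by
          rw [hsuf y (List.mem_reverse.mp hy) (L + 1), hchy y (List.mem_reverse.mp hy)]
      -- new invariant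
      have hinv' : ∀ z ∈ ch.reverse ++ st', PySem.Raise.InRange n z ∧
          ∃ kz, kz ≤ n ∧ pvNorm n z ∈ pvFront graph root kz ∧ lv'.getD z 0 = (kz : Int) := by
        intro z hz
        rcases List.mem_append.mp hz with hzc | hzs
        · have hzc := List.mem_reverse.mp hzc
          refine ⟨hchG z hzc, k + 1, hk1 z hzc, hchF z hzc, ?_⟩
          rw [hchy z hzc, hlv]
          push_cast; ring
        · obtain ⟨hzr, kz, hkz, hzm, hzlv⟩ := hinv z (List.mem_cons_of_mem x hzs)
          exact ⟨hzr, kz, hkz, hzm, by rw [hstz z hzs]; exact hzlv⟩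
      -- fuel bound for the recursive call
      have hf' : ((ch.reverse ++ st').map (fun z =>
          (pvDfsB g (n + 1) z (lv'.getD z 0)).length)).sum ≤ f := by
        simp only [List.map_cons, List.sum_cons] at hf
        rw [hhead] at hf
        simp only [List.length_cons, List.length_flatMap] at hf
        have hmapeq : st'.map (fun z => (pvDfsB g (n + 1) z (lv'.getD z 0)).length)
            = st'.map (fun z => (pvDfsB g (n + 1) z (lv.getD z 0)).length) :=
          List.map_congr_left fun z hz => by rw [hstz z hz]
        rw [List.map_append, List.sum_append, hmapeq]
        omega
      -- apply the induction hypothesis and reassemble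
      rw [hstep, ih (ch.reverse ++ st') lv' (L :: acc) hinv' hf']
      rw [List.flatMap_append]
      have hst'f : st'.flatMap (fun z => pvDfsB g (n + 1) z (lv'.getD z 0))
          = st'.flatMap (fun z => pvDfsB g (n + 1) z (lv.getD z 0)) :=
        List.flatMap_congr fun z hz => by rw [hstz z hz]
      rw [hst'f]
      simp only [List.flatMap_cons, List.reverse_cons, List.append_assoc]
      rw [← hLdef, hhead]
      simp

-- ===== VERDICT (by name: the statement is the Claim_ definition above) =====
theorem levels_from_preim_py_spec : Claim_equal_levels_from_preim_py := by
  intro graph root keys _ hPre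
  obtain ⟨hroot, hGb, _hkeys, hE, hUb⟩ := hPre
  have hG : ∀ k ≤ graph.length, ∀ v ∈ pvFront graph root k,
      ∀ y ∈ pvChildren graph v, PySem.Raise.InRange graph.length y := by
    intro k hk v hv y hy
    have h1 := List.all_eq_true.mp hGb k (List.mem_range.mpr (Nat.lt_succ_of_le hk))
    have h2 := List.all_eq_true.mp h1 v hv
    exact of_decide_eq_true (List.all_eq_true.mp h2 y hy)
  have hU : ∀ i ≤ graph.length, ∀ j ≤ graph.length, i ≠ j →
      ∀ v ∈ pvFront graph root i, v ∉ pvFront graph root j := by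
    intro i hi j hj hne v hvi hvj
    have h1 := List.all_eq_true.mp hUb i (List.mem_range.mpr (Nat.lt_succ_of_le hi))
    have h2 := List.all_eq_true.mp h1 j (List.mem_range.mpr (Nat.lt_succ_of_le hj))
    rw [Bool.or_eq_true] at h2
    rcases h2 with h2 | h2
    · exact hne (by simpa using h2)
    · have h3 := List.all_eq_true.mp h2 v hvi
      simp at h3
      exact h3 hvj
  unfold Spec_levels_from_preim_py levels_from_preim_py levels_from_preim_py_alt
  have hlen : (pvSortGraph graph keys).length = graph.length := pvSort_length graph keys
  have hinv0 : ∀ x ∈ [root], PySem.Raise.InRange graph.length x ∧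
      ∃ k, k ≤ graph.length ∧ pvNorm graph.length x ∈ pvFront graph root k ∧
        (PySem.Dict.empty.insert root 0).getD x 0 = (k : Int) := by
    intro x hx
    rw [List.mem_singleton] at hx
    subst hx
    refine ⟨hroot, 0, Nat.zero_le _, ?_, ?_⟩
    · show pvNorm graph.length x ∈ [pvNorm graph.length x]
      exact List.mem_singleton_self _
    · rw [PySem.Dict.getD_insert_self]
      rfl
  have hfuel : (([root].map (fun x =>
      (pvDfsB (pvSortGraph graph keys) (graph.length + 1) x
        ((PySem.Dict.empty.insert root 0).getD x 0)).length)).sum)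
      ≤ pvFuelA (pvSortGraph graph keys) := by
    simp only [List.map_cons, List.map_nil, List.sum_cons, List.sum_nil, Nat.add_zero]
    calc (pvDfsB (pvSortGraph graph keys) (graph.length + 1) root
            ((PySem.Dict.empty.insert root 0).getD root 0)).length
        ≤ (((pvSortGraph graph keys).map List.length).sum + 2) ^ (graph.length + 1) :=
          pvDfsB_len (pvSortGraph graph keys) (graph.length + 1) root _
      _ = pvFuelA (pvSortGraph graph keys) := by rw [pvFuelA, hlen]
  have h := pvMachine graph root keys hG hE hU (pvFuelA (pvSortGraph graph keys)) [root]
    (PySem.Dict.empty.insert root 0) [] hinv0 hfuel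
  simp only [List.flatMap_cons, List.flatMap_nil, List.append_nil, List.reverse_nil,
    List.nil_append] at h
  rw [h, PySem.Dict.getD_insert_self]
  show _ = pvDfsB (pvSortGraph graph keys) ((pvSortGraph graph keys).length + 1) root 0
  rw [hlen]
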